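-- pv_equiv track=rewrite | github.com/Ing-Josef-Klotzner/python | 2017/hackerrank/arrayPairs.py | getMidMax
-- ===== SOURCE A (Python) =====
-- def getMidMax (arr):
--     max_list = []
--     max_value = 0
--     for i, value in enumerate (arr):
--         if value > max_value:
--             max_value = value
--             max_list = []
--         if value == max_value:
--             max_list.append (i)
--     mid_index = max_list [len (max_list) // 2]
--     return max_value, mid_index
-- ===== SOURCE B (Python) =====
-- def getMidMax(arr):
--     m = 0
--     for v in arr:
--         if v > m:
--             m = v
--     indices = [i for i, v in enumerate(arr) if v == m]
--     return m, indices[len(indices) // 2]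
-- ===== Notes on version B (the rewrite author's own statement) =====
-- stated objective: simpler
-- what changed: Replaces A's single interleaved scan (running max with reset-on-new-max and append-on-equal bookkeeping) by two plain passes: first find the max (floored at 0), then collect the indices where it occurs and take the middle one.
import Mathlib
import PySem

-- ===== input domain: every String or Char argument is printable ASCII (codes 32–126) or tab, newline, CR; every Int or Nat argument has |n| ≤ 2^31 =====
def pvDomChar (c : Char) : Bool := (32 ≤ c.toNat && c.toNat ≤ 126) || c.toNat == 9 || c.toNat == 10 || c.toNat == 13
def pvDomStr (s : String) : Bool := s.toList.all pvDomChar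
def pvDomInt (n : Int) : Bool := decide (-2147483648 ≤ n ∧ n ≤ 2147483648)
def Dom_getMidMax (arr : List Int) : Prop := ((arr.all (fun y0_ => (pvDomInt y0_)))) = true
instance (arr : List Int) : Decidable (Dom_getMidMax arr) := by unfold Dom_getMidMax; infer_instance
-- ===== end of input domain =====

-- B replaces A's single interleaved scan by a find-max pass followed by a collect-occurrences pass (simpler; same O(n) cost).

-- ===== PORT A =====
-- one step of A's loop body: state = (max_list, max_value), element = (i, value)
def getMidMaxStep (st : List Int × Int) (p : Int × Int) : List Int × Int :=
  let st1 := if p.2 > st.2 then (([] : List Int), p.2) else st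
  if p.2 == st1.2 then (st1.1 ++ [p.1], st1.2) else st1

def getMidMax (arr : List Int) : Int × Int :=
  let st := (PySem.List.enumerate arr 0).foldl getMidMaxStep ([], 0)
  -- max_list[len(max_list)//2]: pyGetD under Pre_ (A raises IndexError when max_list is empty)
  (st.2, PySem.List.pyGetD st.1 (PySem.Int.floordiv (st.1.length : Int) 2) 0)

-- ===== PORT B =====
def getMidMax_alt (arr : List Int) : Int × Int :=
  let m := arr.foldl (fun m v => if v > m then v else m) 0
  let indices := ((PySem.List.enumerate arr 0).filter (fun p => p.2 == m)).map Prod.fst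
  (m, PySem.List.pyGetD indices (PySem.Int.floordiv (indices.length : Int) 2) 0)

-- ===== PRECONDITION & SPEC =====
-- A (and B) raise IndexError exactly when arr has no element ≥ 0 (max_value stays 0 and max_list stays empty): excluded.
def Pre_getMidMax (arr : List Int) : Prop := ∃ x ∈ arr, 0 ≤ x
instance (arr : List Int) : Decidable (Pre_getMidMax arr) := by unfold Pre_getMidMax; infer_instance
def pvWitness_getMidMax : List Int := [1, 3, -2, 3, 0]

def Spec_getMidMax (arr : List Int) (out : Int × Int) : Prop := out = getMidMax_alt arr
instance (arr : List Int) (out : Int × Int) : Decidable (Spec_getMidMax arr out) := by unfold Spec_getMidMax; infer_instance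

-- ===== CLAIM (what is proved, stated in full; the proofs are below) =====
def Claim_equal_getMidMax : Prop := ∀ (arr : List Int), Dom_getMidMax arr → Pre_getMidMax arr → Spec_getMidMax arr (getMidMax arr)

-- ===== LEMMAS AND PROOFS =====

-- the running max never decreases along B's first pass
lemma le_foldl_maxStep (arr : List Int) : ∀ (m : Int),
    m ≤ arr.foldl (fun m v => if v > m then v else m) m := by
  induction arr with
  | nil => intro m; simp
  | cons v rest ih =>
    intro m
    simp only [List.foldl_cons]
    split_ifs with h
    · exact le_trans (le_of_lt h) (ih v)
    · exact ih m

-- characterisation of A's interleaved loop: the final max is B's running max, and the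
-- final max_list is exactly the (prefixed) occurrence indices of that max
lemma foldA_eq (arr : List Int) : ∀ (s mv : Int) (ml : List Int),
    (PySem.List.enumerate arr s).foldl getMidMaxStep (ml, mv)
      = ((if arr.foldl (fun m v => if v > m then v else m) mv = mv then ml else [])
           ++ ((PySem.List.enumerate arr s).filter
                 (fun p => p.2 == arr.foldl (fun m v => if v > m then v else m) mv)).map Prod.fst,
         arr.foldl (fun m v => if v > m then v else m) mv) := by
  induction arr with
  | nil => intro s mv ml; simp [PySem.List.enumerate_nil]
  | cons v rest ih =>
    intro s mv ml
    rw [PySem.List.enumerate_cons]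
    simp only [List.foldl_cons, List.filter_cons]
    by_cases hv : v > mv
    · have hstep : getMidMaxStep (ml, mv) (s, v) = ([s], v) := by
        simp [getMidMaxStep, hv]
      rw [hstep, ih]
      have hM : v ≤ rest.foldl (fun m v => if v > m then v else m) v := le_foldl_maxStep rest v
      simp only [List.foldl_cons, if_pos hv]
      by_cases hMe : rest.foldl (fun m v => if v > m then v else m) v = v
      · have hne : v ≠ mv := by omega
        simp [hMe, hne]
      · have h1 : ¬ (rest.foldl (fun m v => if v > m then v else m) v = mv) := by omega
        have h2 : ¬ (v = rest.foldl (fun m v => if v > m then v else m) v) := fun h => hMe h.symm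
        simp [hMe, h1, h2]
    · have hMmv : mv ≤ rest.foldl (fun m v => if v > m then v else m) mv := le_foldl_maxStep rest mv
      simp only [List.foldl_cons, if_neg hv]
      by_cases hve : v == mv
      · have hveq : v = mv := eq_of_beq hve
        have hstep : getMidMaxStep (ml, mv) (s, v) = (ml ++ [s], mv) := by
          simp [getMidMaxStep, hv, hve]
        rw [hstep, ih]
        by_cases hMe : rest.foldl (fun m v => if v > m then v else m) mv = mv
        · simp [hMe, hveq]
        · have : ¬ (v = rest.foldl (fun m v => if v > m then v else m) mv) := by omega
          simp [hMe, this]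
      · have hstep : getMidMaxStep (ml, mv) (s, v) = (ml, mv) := by
          simp [getMidMaxStep, hv, hve]
        rw [hstep, ih]
        have hvne : v ≠ mv := by simpa using hve
        have hvlt : v < mv := by
          rcases lt_or_ge v mv with h | h
          · exact h
          · omega
        have : ¬ (v = rest.foldl (fun m v => if v > m then v else m) mv) := by omega
        simp [this]

-- ===== VERDICT (by name: the statement is the Claim_ definition above) =====
theorem getMidMax_spec : Claim_equal_getMidMax := by
  intro arr _ _
  unfold Spec_getMidMax getMidMax getMidMax_alt
  rw [foldA_eq arr 0 0 []]
  simp
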